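-- pv_equiv track=rewrite | github.com/laurentbeaughon/aoc2024 | src/day_2.py | gen_sequences
-- ===== SOURCE A (Python) =====
-- def gen_sequences(length):
--     sequences = [[(i, i+1) for i in range(length - 1)]]
--     for i in range(length - 1):
--         sequence = []
--         for j in range(length - 1):
--             if j==i:
--                 pass
--             elif j == i - 1:
--                 sequence.append((j, j + 2))
--             else:
--                 sequence.append((j, j + 1))
--         sequences.append(sequence)
--     sequences.append([(i, i+1) for i in range(length - 2)])
--     return sequences
-- ===== SOURCE B (Python) =====
-- def gen_sequences(length):
--     base = list(range(length))
--
--     def pairs(s):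
--         return list(zip(s, s[1:]))
--
--     result = [pairs(base)]
--     for k in range(length - 1):
--         result.append(pairs(base[:k] + base[k + 1:]))
--     result.append(pairs(base[:-1]))
--     return result
-- ===== Notes on version B (the rewrite author's own statement) =====
-- stated objective: alternative
-- what changed: A builds each row by looping over pair indices with inline skip/shift branch arithmetic (j==i skip, j==i-1 -> (j,j+2)); B instead materialises base=range(length) and for each removal index deletes that element and zips the survivors with their own tail (delete-then-zip decomposition).
import Mathlib
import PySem

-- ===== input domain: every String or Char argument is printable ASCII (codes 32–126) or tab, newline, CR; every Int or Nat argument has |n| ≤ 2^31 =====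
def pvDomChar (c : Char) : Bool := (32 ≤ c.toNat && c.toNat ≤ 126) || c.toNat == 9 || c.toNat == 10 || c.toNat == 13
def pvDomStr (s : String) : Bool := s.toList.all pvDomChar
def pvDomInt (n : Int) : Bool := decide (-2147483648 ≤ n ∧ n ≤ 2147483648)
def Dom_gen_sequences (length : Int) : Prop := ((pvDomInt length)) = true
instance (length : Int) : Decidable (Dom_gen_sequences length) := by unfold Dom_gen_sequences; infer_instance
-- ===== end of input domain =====

-- B replaces A's inline skip-branch index arithmetic by 'delete the element, then zip adjacent survivors' (alternative decomposition, same cost).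

-- ===== PORT A =====
def gen_sequences (length : Int) : List (List (Int × Int)) :=
  let sequences : List (List (Int × Int)) :=
    [(PySem.List.pyRange 0 (length - 1) 1).map (fun i => (i, i + 1))]
  let sequences := (PySem.List.pyRange 0 (length - 1) 1).foldl
    (fun seqs i =>
      let sequence := (PySem.List.pyRange 0 (length - 1) 1).foldl
        (fun sq j =>
          if j == i then sq
          else if j == i - 1 then sq ++ [(j, j + 2)]
          else sq ++ [(j, j + 1)]) ([] : List (Int × Int))
      seqs ++ [sequence]) sequences
  sequences ++ [(PySem.List.pyRange 0 (length - 2) 1).map (fun i => (i, i + 1))]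

-- ===== PORT B =====
-- pairs(s) = list(zip(s, s[1:]))
def pvPairs (s : List Int) : List (Int × Int) :=
  s.zip (PySem.List.slice s (some 1) none)

def gen_sequences_alt (length : Int) : List (List (Int × Int)) :=
  let base := PySem.List.pyRange 0 length 1
  let result := [pvPairs base]
  let result := (PySem.List.pyRange 0 (length - 1) 1).foldl
    (fun res k =>
      res ++ [pvPairs (PySem.List.slice base none (some k) ++
                       PySem.List.slice base (some (k + 1)) none)]) result
  result ++ [pvPairs (PySem.List.slice base none (some (-1)))]

-- ===== PRECONDITION & SPEC =====
def Spec_gen_sequences (length : Int) (out : List (List (Int × Int))) : Prop := out = gen_sequences_alt length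
instance (length : Int) (out : List (List (Int × Int))) : Decidable (Spec_gen_sequences length out) := by unfold Spec_gen_sequences; infer_instance

-- ===== CLAIM (what is proved, stated in full; the proofs are below) =====
def Claim_equal_gen_sequences : Prop := ∀ (length : Int), Dom_gen_sequences length → Spec_gen_sequences length (gen_sequences length)

-- ===== LEMMAS AND PROOFS =====

lemma pvPairs_eq_zip_tail (s : List Int) : pvPairs s = s.zip s.tail := by
  simp [pvPairs, PySem.List.slice_from_one]

-- adjacent pairs of pyRange a b 1
lemma pairs_pyRange (a b : Int) :
    (PySem.List.pyRange a b 1).zip (PySem.List.pyRange a b 1).tail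
      = (PySem.List.pyRange a (b - 1) 1).map (fun i => (i, i + 1)) := by
  rcases (by omega : b ≤ a ∨ a < b) with h | h
  · rw [PySem.List.pyRange_one_eq_nil h, PySem.List.pyRange_one_eq_nil (by omega : b - 1 ≤ a)]
    simp
  · rw [PySem.List.pyRange_one_cons h]
    rcases (by omega : b ≤ a + 1 ∨ a + 1 < b) with h2 | h2
    · rw [PySem.List.pyRange_one_eq_nil h2, PySem.List.pyRange_one_eq_nil (by omega : b - 1 ≤ a)]
      simp
    · have hr := PySem.List.pyRange_one_cons h2
      have ih := pairs_pyRange (a + 1) b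
      rw [hr] at ih ⊢
      simp only [List.tail_cons] at ih
      simp only [List.zip_cons_cons, List.tail_cons]
      rw [ih, PySem.List.pyRange_one_cons (by omega : a < b - 1)]
      simp
termination_by (b - a).toNat
decreasing_by omega

lemma zip_tail_append : ∀ (u v : List Int) (hu : u ≠ []) (hv : v ≠ []),
    (u ++ v).zip (u ++ v).tail
      = u.zip u.tail ++ (u.getLast hu, v.head hv) :: v.zip v.tail
  | [], _, hu, _ => absurd rfl hu
  | [x], v, _, hv => by
      cases v with
      | nil => exact absurd rfl hv
      | cons h t => simp
  | x :: y :: t, v, hu, hv => by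
      have ih := zip_tail_append (y :: t) v (by simp) hv
      simp only [List.cons_append, List.zip_cons_cons, List.tail_cons] at *
      rw [ih]
      simp

lemma pyRange_ne_nil (a b : Int) (h : a < b) : PySem.List.pyRange a b 1 ≠ [] := by
  rw [PySem.List.pyRange_one_cons h]; simp

lemma getLast_pyRange (i : Int) (h : 0 < i) (hne : PySem.List.pyRange 0 i 1 ≠ []) :
    (PySem.List.pyRange 0 i 1).getLast hne = i - 1 := by
  have e : PySem.List.pyRange 0 i 1 = PySem.List.pyRange 0 (i - 1) 1 ++ [i - 1] := by
    have := PySem.List.pyRange_one_succ_right (by omega : (0:Int) ≤ i - 1)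
    rwa [show i - 1 + 1 = i by ring] at this
  simp [e]

lemma head_pyRange (a b : Int) (h : a < b) (hne : PySem.List.pyRange a b 1 ≠ []) :
    (PySem.List.pyRange a b 1).head hne = a := by
  have := PySem.List.pyRange_one_cons h
  simp [this]

lemma slice_to_pyRange (n i : Int) (h0 : 0 ≤ i) (h : i ≤ n) :
    PySem.List.slice (PySem.List.pyRange 0 n 1) none (some i) = PySem.List.pyRange 0 i 1 := by
  rw [PySem.List.slice_to _ h0]
  rw [PySem.List.pyRange_one_append 0 i n h0 h]
  exact List.take_left' (by simp [PySem.List.length_pyRange_one])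

lemma slice_from_pyRange (n i : Int) (h0 : 0 ≤ i) (h : i ≤ n) :
    PySem.List.slice (PySem.List.pyRange 0 n 1) (some i) none = PySem.List.pyRange i n 1 := by
  rw [PySem.List.slice_from _ h0]
  rw [PySem.List.pyRange_one_append 0 i n h0 h]
  exact List.drop_left' (by simp [PySem.List.length_pyRange_one])

lemma dropLast_pyRange (n : Int) :
    (PySem.List.pyRange 0 n 1).dropLast = PySem.List.pyRange 0 (n - 1) 1 := by
  rcases (by omega : n ≤ 0 ∨ 0 < n) with h | h
  · rw [PySem.List.pyRange_one_eq_nil h, PySem.List.pyRange_one_eq_nil (by omega)]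
    rfl
  · have e : PySem.List.pyRange 0 n 1 = PySem.List.pyRange 0 (n - 1) 1 ++ [n - 1] := by
      have := PySem.List.pyRange_one_succ_right (by omega : (0:Int) ≤ n - 1)
      rwa [show n - 1 + 1 = n by ring] at this
    rw [e, List.dropLast_concat]

-- A's inner loop body as 'extend by a short list'
lemma innerA_eq_flatMap (i : Int) (R : List Int) :
    R.foldl (fun sq j =>
        if j == i then sq
        else if j == i - 1 then sq ++ [(j, j + 2)]
        else sq ++ [(j, j + 1)]) ([] : List (Int × Int))
      = R.flatMap (fun j =>
          if j = i then []
          else if j = i - 1 then [(j, j + 2)]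
          else [(j, j + 1)]) := by
  have hfun : (fun (sq : List (Int × Int)) (j : Int) =>
        if j == i then sq
        else if j == i - 1 then sq ++ [(j, j + 2)]
        else sq ++ [(j, j + 1)])
      = fun sq j => sq ++ (if j = i then []
          else if j = i - 1 then [(j, j + 2)]
          else [(j, j + 1)]) := by
    funext sq j
    by_cases h1 : j = i <;> by_cases h2 : j = i - 1 <;> simp [h1, h2]
  rw [hfun, PySem.List.foldl_append_eq_flatMap]
  simp

lemma flatMap_singleton_of (l : List Int) (g : Int → List (Int × Int)) (f : Int → Int × Int)
    (h : ∀ j ∈ l, g j = [f j]) : l.flatMap g = l.map f := by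
  induction l with
  | nil => rfl
  | cons x xs ih =>
    simp only [List.flatMap_cons, List.map_cons, h x (by simp)]
    rw [ih (fun j hj => h j (by simp [hj]))]
    rfl

-- the middle rows agree: skipping index i in A = delete-then-zip in B
lemma middle_eq (n i : Int) (h0 : 0 ≤ i) (h1 : i < n - 1) :
    (PySem.List.pyRange 0 (n - 1) 1).flatMap (fun j =>
        if j = i then []
        else if j = i - 1 then [(j, j + 2)]
        else [(j, j + 1)])
      = pvPairs (PySem.List.pyRange 0 i 1 ++ PySem.List.pyRange (i + 1) n 1) := by
  rw [pvPairs_eq_zip_tail]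
  rcases eq_or_lt_of_le h0 with h | hpos
  · -- i = 0 : first element removed
    subst h
    simp only [PySem.List.pyRange_one_eq_nil (by omega : (0:Int) ≤ 0), List.nil_append]
    norm_num
    rw [pairs_pyRange 1 n]
    rw [PySem.List.pyRange_one_cons (by omega : (0:Int) < n - 1), List.flatMap_cons]
    simp only []
    exact flatMap_singleton_of _ _ _ (fun j hj => by
      have := (PySem.List.mem_pyRange_one).1 hj
      rw [if_neg (by omega), if_neg (by omega)])
  · -- 0 < i : u = [0..i-1] nonempty, v = [i+1..n-1] nonempty
    have hu : PySem.List.pyRange 0 i 1 ≠ [] := pyRange_ne_nil 0 i hpos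
    have hv : PySem.List.pyRange (i + 1) n 1 ≠ [] := pyRange_ne_nil (i + 1) n (by omega)
    rw [zip_tail_append _ _ hu hv, getLast_pyRange i hpos hu, head_pyRange (i + 1) n (by omega) hv]
    rw [pairs_pyRange 0 i, pairs_pyRange (i + 1) n]
    -- split A's range at i-1, i, i+1
    rw [PySem.List.pyRange_one_append 0 (i - 1) (n - 1) (by omega) (by omega),
        PySem.List.pyRange_one_append (i - 1) (i + 1) (n - 1) (by omega) (by omega),
        PySem.List.pyRange_one_append (i - 1) i (i + 1) (by omega) (by omega)]
    have hs1 : PySem.List.pyRange (i - 1) i 1 = [i - 1] := by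
      have := PySem.List.pyRange_one_singleton (i - 1)
      rwa [show i - 1 + 1 = i by ring] at this
    have hs2 : PySem.List.pyRange i (i + 1) 1 = [i] := PySem.List.pyRange_one_singleton i
    rw [hs1, hs2]
    rw [List.flatMap_append, List.flatMap_append, List.flatMap_append]
    rw [flatMap_singleton_of (PySem.List.pyRange 0 (i - 1) 1) _ (fun j => (j, j + 1)) (fun j hj => by
      have := (PySem.List.mem_pyRange_one).1 hj
      rw [if_neg (by omega), if_neg (by omega)])]
    rw [flatMap_singleton_of (PySem.List.pyRange (i + 1) (n - 1) 1) _ (fun j => (j, j + 1)) (fun j hj => by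
      have := (PySem.List.mem_pyRange_one).1 hj
      rw [if_neg (by omega), if_neg (by omega)])]
    simp [show ¬((i:Int) - 1 = i) from by omega, show i - 1 + 2 = i + 1 from by ring]

-- ===== VERDICT (by name: the statement is the Claim_ definition above) =====
theorem gen_sequences_spec : Claim_equal_gen_sequences := by
  intro n _
  unfold Spec_gen_sequences gen_sequences gen_sequences_alt
  simp only [PySem.List.foldl_append_singleton_eq_map]
  congr 1
  · congr 1
    · -- first rows agree
      rw [pvPairs_eq_zip_tail, pairs_pyRange 0 n]
    · -- middle rows agree
      apply List.map_congr_left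
      intro i hi
      have hmem := (PySem.List.mem_pyRange_one).1 hi
      rw [innerA_eq_flatMap,
          slice_to_pyRange n i (by omega) (by omega),
          slice_from_pyRange n (i + 1) (by omega) (by omega)]
      exact middle_eq n i (by omega) (by omega)
  · -- last rows agree
    rw [PySem.List.slice_to_neg_one, dropLast_pyRange, pvPairs_eq_zip_tail,
        pairs_pyRange 0 (n - 1)]
    rw [show n - 1 - 1 = n - 2 by ring]
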